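-- pv_equiv track=rewrite | github.com/marvinkreis/guut-evaluation | guut/guut/formatting.py | limit_text_by_line
-- ===== SOURCE A (Python) =====
-- def limit_text_by_line(text: str, char_limit: int = 2000) -> str:
--     num_chars = 0
--     lines = []
--     for line in text.splitlines():
--         num_chars += len(line) + 1
--         if num_chars > char_limit:
--             return "\n".join(lines) + "\n<truncated>"
--         lines.append(line)
--     return text
-- ===== SOURCE B (Python) =====
-- def limit_text_by_line(text: str, char_limit: int = 2000) -> str:
--     # Two-phase: build the full prefix-sum table of line lengths first,
--     # then decide where (if anywhere) to cut.
--     lines = text.splitlines()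
--     sums = []
--     total = 0
--     for line in lines:
--         total += len(line) + 1
--         sums.append(total)
--     cut = next((i for i, s in enumerate(sums) if s > char_limit), None)
--     if cut is None:
--         return text
--     return "\n".join(lines[:cut]) + "\n<truncated>"
-- ===== Notes on version B (the rewrite author's own statement) =====
-- stated objective: alternative
-- what changed: A interleaves counting and the early-return truncation decision in one loop; B first builds the full prefix-sum table of line lengths, then scans it for the first index exceeding the limit and truncates there (or returns the text unchanged).
import Mathlib
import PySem

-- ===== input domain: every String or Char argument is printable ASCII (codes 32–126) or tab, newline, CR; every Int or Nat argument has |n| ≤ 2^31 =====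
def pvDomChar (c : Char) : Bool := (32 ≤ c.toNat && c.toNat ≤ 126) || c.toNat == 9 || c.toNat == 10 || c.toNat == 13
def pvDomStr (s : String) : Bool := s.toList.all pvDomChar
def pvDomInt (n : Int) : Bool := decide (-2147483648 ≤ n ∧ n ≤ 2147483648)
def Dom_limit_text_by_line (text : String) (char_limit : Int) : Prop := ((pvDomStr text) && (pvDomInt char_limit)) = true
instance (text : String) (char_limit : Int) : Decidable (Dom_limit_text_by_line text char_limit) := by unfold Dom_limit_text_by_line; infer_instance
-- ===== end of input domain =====

-- B replaces A's interleaved count-and-early-return loop by a two-phase decomposition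
-- (build the full prefix-sum table, then find the first cut index); objective: alternative.

-- ===== PORT A =====
-- A's loop: num_chars accumulates, early return on exceeding the limit, lines collects kept lines.
def limitGoA (char_limit : Int) (ls : List String) (num_chars : Int) (lines : List String) : Option String :=
  match ls with
  | [] => none
  | line :: rest =>
    let num_chars := num_chars + PySem.Str.len line + 1
    if num_chars > char_limit then
      some (PySem.Str.join "\n" lines ++ "\n<truncated>")
    else
      limitGoA char_limit rest num_chars (lines ++ [line])

def limit_text_by_line (text : String) (char_limit : Int) : String :=
  match limitGoA char_limit (PySem.Str.splitlines text) 0 [] with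
  | some s => s
  | none => text

-- ===== PORT B =====
-- B phase 1: the prefix-sum table of (len line + 1).
def limitSums (total : Int) (ls : List String) : List Int :=
  match ls with
  | [] => []
  | line :: rest =>
    let total := total + PySem.Str.len line + 1
    total :: limitSums total rest

def limit_text_by_line_alt (text : String) (char_limit : Int) : String :=
  let lines := PySem.Str.splitlines text
  let sums := limitSums 0 lines
  match sums.findIdx? (fun s => s > char_limit) with
  | some cut => PySem.Str.join "\n" (lines.take cut) ++ "\n<truncated>"
  | none => text

-- ===== PRECONDITION & SPEC =====
def Spec_limit_text_by_line (text : String) (char_limit : Int) (out : String) : Prop := out = limit_text_by_line_alt text char_limit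
instance (text : String) (char_limit : Int) (out : String) : Decidable (Spec_limit_text_by_line text char_limit out) := by unfold Spec_limit_text_by_line; infer_instance

-- ===== CLAIM (what is proved, stated in full; the proofs are below) =====
def Claim_equal_limit_text_by_line : Prop := ∀ (text : String) (char_limit : Int), Dom_limit_text_by_line text char_limit → Spec_limit_text_by_line text char_limit (limit_text_by_line text char_limit)

-- ===== LEMMAS AND PROOFS =====

-- A's loop equals: find the first index of the shifted prefix-sum table exceeding the limit,
-- and truncate there (relative to the lines already kept).
theorem limitGoA_eq (char_limit : Int) (ls : List String) (nc : Int) (prev : List String) :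
    limitGoA char_limit ls nc prev =
      match (limitSums nc ls).findIdx? (fun s => s > char_limit) with
      | some cut => some (PySem.Str.join "\n" (prev ++ ls.take cut) ++ "\n<truncated>")
      | none => none := by
  induction ls generalizing nc prev with
  | nil => simp [limitGoA, limitSums]
  | cons line rest ih =>
    simp only [limitGoA, limitSums, List.findIdx?_cons]
    by_cases h : nc + PySem.Str.len line + 1 > char_limit
    · rw [if_pos h, if_pos (by simpa using h)]
      simp
    · rw [if_neg h, if_neg (by simpa using h)]
      cases hf : List.findIdx? (fun s => decide (s > char_limit)) (limitSums (nc + PySem.Str.len line + 1) rest) with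
      | none => rw [ih, hf]; rfl
      | some cut => rw [ih, hf]; simp

-- ===== VERDICT (by name: the statement is the Claim_ definition above) =====
theorem limit_text_by_line_spec : Claim_equal_limit_text_by_line := by
  intro text char_limit _
  unfold Spec_limit_text_by_line limit_text_by_line limit_text_by_line_alt
  rw [limitGoA_eq]
  cases hf : (limitSums 0 (PySem.Str.splitlines text)).findIdx? (fun s => s > char_limit) <;> simp [hf]
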